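-- pv_equiv track=rewrite | github.com/discordwell/emperorbfdune | tools/extract_string_table.py | build_string_table
-- ===== SOURCE A (Python) =====
-- def build_string_table(unit_types, building_types):
--     """
--     Build the 128-entry .tok string table.
--
--     Layout (verified from Start mission analysis):
--       - Buildings start at index 111, following rules.txt BuildingTypes order
--       - Only HK/AT/OR military buildings are included (41 entries)
--         HK: 14 buildings (SmWindtrap through ConYard) at indices 111-124
--         AT: 14 buildings at indices 125-127, 0-10
--         OR: 13 buildings at indices 11-23
--       - After OR buildings, subhouse buildings continue: 24-32
--         TLFleshVat(24), GUPalace(25), IXResCentre(26), IMBarracks(27),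
--         FRCamp(28), HKRefineryDock(29), ATRefineryDock(30), ORRefineryDock(31),
--         BeaconFlare(32)
--       - Units fill indices 33-110 (78 entries) in rules.txt UnitTypes order
--     """
--     table = [''] * 128
--
--     # --- Buildings (starting at index 111, wrapping at 128) ---
--     # Military buildings: HK(14) + AT(14) + OR(13) = 41
--     # Then subhouse: TLFleshVat, GUPalace, IXResCentre, IMBarracks, FRCamp = 5
--     # Then docks: HKRefineryDock, ATRefineryDock, ORRefineryDock = 3
--     # Then BeaconFlare = 1
--     # Total buildings in table: 50
--
--     # Identify military + subhouse buildings from rules.txt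
--     # The building list from rules.txt first section includes ALL buildings,
--     # but the .tok table only includes through BeaconFlare (index 49 in the list)
--
--     # HK military buildings (14): indices 0-13 in building list
--     hk_military = [
--         'HKSmWindtrap', 'HKBarracks', 'HKWall', 'HKRefinery', 'HKFactory',
--         'HKFactoryFrigate', 'HKOutpost', 'HKFlameTurret', 'HKGunTurret',
--         'HKHanger', 'HKHelipad', 'HKStarport', 'HKPalace', 'HKConYard',
--     ]
--     # AT military buildings (14): indices 14-27
--     at_military = [
--         'ATSmWindtrap', 'ATBarracks', 'ATWall', 'ATRefinery', 'ATFactory',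
--         'ATFactoryFrigate', 'ATOutpost', 'ATPillbox', 'ATRocketTurret',
--         'ATHanger', 'ATHelipad', 'ATStarport', 'ATPalace', 'ATConYard',
--     ]
--     # OR military buildings (13): indices 28-40
--     or_military = [
--         'ORSmWindtrap', 'ORBarracks', 'ORWall', 'ORRefinery', 'ORFactory',
--         'ORFactoryFrigate', 'OROutpost', 'ORGasTurret', 'ORPopUpTurret',
--         'ORHanger', 'ORStarport', 'ORPalace', 'ORConYard',
--     ]
--     # Subhouse + utility buildings (9): indices 41-49
--     subhouse_buildings = [
--         'TLFleshVat', 'GUPalace', 'IXResCentre', 'IMBarracks', 'FRCamp',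
--         'HKRefineryDock', 'ATRefineryDock', 'ORRefineryDock', 'BeaconFlare',
--     ]
--
--     all_buildings = hk_military + at_military + or_military + subhouse_buildings
--     building_start = 111  # First building index in .tok table
--
--     for i, name in enumerate(all_buildings):
--         idx = (building_start + i) % 128
--         table[idx] = name
--
--     # --- Units (filling remaining slots) ---
--     # Buildings occupy: 111-127 (17 slots) + 0-32 (33 slots) = 50 slots
--     # Units occupy: 33-110 (78 slots)
--     unit_start = 33
--
--     # Take the first 78 units from rules.txt order
--     for i, name in enumerate(unit_types[:78]):
--         idx = unit_start + i
--         if idx < 128: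
--             table[idx] = name
--
--     return table
-- ===== SOURCE B (Python) =====
-- # B: generate the building names programmatically (house prefix x shared suffix
-- # lists) and build the table as an index-driven comprehension over range(128),
-- # instead of A's hardcoded lists + preallocated array with modular assignment.
--
-- _HOUSE_COMMON = ['SmWindtrap', 'Barracks', 'Wall', 'Refinery', 'Factory',
--                  'FactoryFrigate', 'Outpost']
-- _HOUSE_TAIL = ['Hanger', 'Helipad', 'Starport', 'Palace', 'ConYard']
--
--
-- def _house(prefix, turrets, has_helipad):
--     tail = _HOUSE_TAIL if has_helipad else _HOUSE_TAIL[:1] + _HOUSE_TAIL[2:]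
--     return [prefix + s for s in _HOUSE_COMMON + turrets + tail]
--
--
-- def _buildings():
--     return (_house('HK', ['FlameTurret', 'GunTurret'], True)
--             + _house('AT', ['Pillbox', 'RocketTurret'], True)
--             + _house('OR', ['GasTurret', 'PopUpTurret'], False)
--             + ['TLFleshVat', 'GUPalace', 'IXResCentre', 'IMBarracks', 'FRCamp']
--             + [h + 'RefineryDock' for h in ['HK', 'AT', 'OR']]
--             + ['BeaconFlare'])
--
--
-- def build_string_table(unit_types, building_types):
--     """Build the 128-entry .tok string table, entry by entry."""
--     bld = _buildings()
--
--     def entry(i):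
--         if i < 33:
--             return bld[i + 17]
--         if i < 111:
--             j = i - 33
--             return unit_types[j] if j < len(unit_types) else ''
--         return bld[i - 111]
--
--     return [entry(i) for i in range(128)]
-- ===== Notes on version B (the rewrite author's own statement) =====
-- stated objective: alternative
-- what changed: B generates the 50 building names programmatically (house prefix applied to shared suffix lists) and builds the table as an index-driven comprehension over range(128) with a per-index case split, instead of A's four hardcoded lists written into a preallocated 128-slot array via modular index assignment.
import Mathlib
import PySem

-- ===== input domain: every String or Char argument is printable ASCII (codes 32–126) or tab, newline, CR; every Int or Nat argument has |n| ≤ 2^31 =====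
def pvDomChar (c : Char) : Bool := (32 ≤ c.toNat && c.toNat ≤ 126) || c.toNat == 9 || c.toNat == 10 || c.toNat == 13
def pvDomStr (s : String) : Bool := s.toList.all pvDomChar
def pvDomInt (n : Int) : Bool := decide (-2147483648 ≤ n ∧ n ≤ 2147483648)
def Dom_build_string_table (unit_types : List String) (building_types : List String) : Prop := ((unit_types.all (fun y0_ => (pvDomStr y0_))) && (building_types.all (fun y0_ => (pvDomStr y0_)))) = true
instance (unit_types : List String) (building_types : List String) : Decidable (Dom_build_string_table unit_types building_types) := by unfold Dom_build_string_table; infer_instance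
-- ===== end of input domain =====

-- B generates the 50 building names programmatically (house prefix + shared suffix lists)
-- and fills the table index by index over range(128), instead of A's hardcoded lists
-- assigned into a preallocated array with modular index arithmetic (objective: alternative).

-- ===== PORT A =====
-- A's four hardcoded name lists
def hk_military : List String := [
  "HKSmWindtrap", "HKBarracks", "HKWall", "HKRefinery", "HKFactory",
  "HKFactoryFrigate", "HKOutpost", "HKFlameTurret", "HKGunTurret",
  "HKHanger", "HKHelipad", "HKStarport", "HKPalace", "HKConYard"]
def at_military : List String := [
  "ATSmWindtrap", "ATBarracks", "ATWall", "ATRefinery", "ATFactory",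
  "ATFactoryFrigate", "ATOutpost", "ATPillbox", "ATRocketTurret",
  "ATHanger", "ATHelipad", "ATStarport", "ATPalace", "ATConYard"]
def or_military : List String := [
  "ORSmWindtrap", "ORBarracks", "ORWall", "ORRefinery", "ORFactory",
  "ORFactoryFrigate", "OROutpost", "ORGasTurret", "ORPopUpTurret",
  "ORHanger", "ORStarport", "ORPalace", "ORConYard"]
def subhouse_buildings : List String := [
  "TLFleshVat", "GUPalace", "IXResCentre", "IMBarracks", "FRCamp",
  "HKRefineryDock", "ATRefineryDock", "ORRefineryDock", "BeaconFlare"]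
def all_buildings : List String := hk_military ++ at_military ++ or_military ++ subhouse_buildings

-- 'for i, name in enumerate(all_buildings): table[(111+i) % 128] = name'
-- (index always 0..127, so List.set is exactly Python's in-range assignment)
def buildingLoop : List String → Nat → List String → List String
  | table, _, [] => table
  | table, i, name :: rest => buildingLoop (table.set ((111 + i) % 128) name) (i + 1) rest

-- 'for i, name in enumerate(unit_types[:78]): idx = 33 + i; if idx < 128: table[idx] = name'
def unitLoop : List String → Nat → List String → List String
  | table, _, [] => table
  | table, i, name :: rest =>
      unitLoop (if 33 + i < 128 then table.set (33 + i) name else table) (i + 1) rest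

def build_string_table (unit_types : List String) (building_types : List String) : List String :=
  let table := List.replicate 128 ""
  let table := buildingLoop table 0 all_buildings
  unitLoop table 0 (PySem.List.slice unit_types none (some 78))

-- ===== PORT B =====
def bHouseCommon : List String := ["SmWindtrap", "Barracks", "Wall", "Refinery", "Factory",
  "FactoryFrigate", "Outpost"]
def bHouseTail : List String := ["Hanger", "Helipad", "Starport", "Palace", "ConYard"]

-- '[prefix + s for s in _HOUSE_COMMON + turrets + tail]'  (string '+' is Str.join "")
def bHouse (p : String) (turrets : List String) (has_helipad : Bool) : List String :=
  let tail := if has_helipad then bHouseTail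
              else PySem.List.slice bHouseTail none (some 1) ++ PySem.List.slice bHouseTail (some 2) none
  (bHouseCommon ++ turrets ++ tail).map (fun s => PySem.Str.join "" [p, s])

def bBuildings : List String :=
  bHouse "HK" ["FlameTurret", "GunTurret"] true
    ++ bHouse "AT" ["Pillbox", "RocketTurret"] true
    ++ bHouse "OR" ["GasTurret", "PopUpTurret"] false
    ++ ["TLFleshVat", "GUPalace", "IXResCentre", "IMBarracks", "FRCamp"]
    ++ (["HK", "AT", "OR"].map (fun h => PySem.Str.join "" [h, "RefineryDock"]))
    ++ ["BeaconFlare"]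

-- 'def entry(i): …'  (bld/unit_types indices in the taken branches are always in
-- range, so the .getD "" default on pyGet? is never used)
def bEntry (unit_types : List String) (bld : List String) (i : Int) : String :=
  if i < 33 then (PySem.List.pyGet? bld (i + 17)).getD ""
  else if i < 111 then
    let j := i - 33
    if j < (unit_types.length : Int) then (PySem.List.pyGet? unit_types j).getD "" else ""
  else (PySem.List.pyGet? bld (i - 111)).getD ""

def build_string_table_alt (unit_types : List String) (building_types : List String) : List String :=
  let bld := bBuildings
  (PySem.List.pyRange 0 128 1).map (bEntry unit_types bld)

-- ===== PRECONDITION & SPEC =====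
def Spec_build_string_table (unit_types : List String) (building_types : List String) (out : List String) : Prop := out = build_string_table_alt unit_types building_types
instance (unit_types : List String) (building_types : List String) (out : List String) : Decidable (Spec_build_string_table unit_types building_types out) := by unfold Spec_build_string_table; infer_instance

-- ===== CLAIM =====
def Claim_equal_build_string_table : Prop := ∀ (unit_types : List String) (building_types : List String), Dom_build_string_table unit_types building_types → Spec_build_string_table unit_types building_types (build_string_table unit_types building_types)

-- ===== LEMMAS AND PROOFS =====

-- the building phase produces the literal 128-entry skeleton:
-- buildings 17..49 in slots 0..32, 78 empty unit slots, buildings 0..16 in slots 111..127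
lemma buildingLoop_eval :
    buildingLoop (List.replicate 128 "") 0 all_buildings
      = all_buildings.drop 17 ++ List.replicate 78 "" ++ all_buildings.take 17 := by
  rfl

lemma unitLoop_eq (us : List String) : ∀ (i : Nat) (t : List String),
    t.length = 128 → 33 + i + us.length ≤ 128 →
    unitLoop t i us = t.take (33 + i) ++ us ++ t.drop (33 + i + us.length) := by
  induction us with
  | nil => intro i t ht _; simp [unitLoop]
  | cons name rest ih =>
    intro i t ht hle
    simp only [List.length_cons] at hle
    have hk : 33 + i < t.length := by rw [ht]; omega
    have hset : t.set (33 + i) name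
        = t.take (33 + i) ++ name :: t.drop (33 + i + 1) := by
      rw [List.set_eq_take_append_cons_drop, if_pos hk]
    have hguard : 33 + i < 128 := by omega
    rw [unitLoop, if_pos hguard,
        ih (i + 1) (t.set (33 + i) name) (by simp [ht]) (by omega)]
    rw [hset]
    have hlen : (t.take (33 + i)).length = 33 + i := by
      rw [List.length_take]; omega
    rw [List.take_append, List.drop_append]
    simp only [hlen]
    have e1 : 33 + (i + 1) - (33 + i) = 1 := by omega
    have e2 : 33 + (i + 1) + rest.length - (33 + i) = rest.length + 1 := by omega
    have e3 : min (33 + (i + 1)) (33 + i) = 33 + i := by omega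
    have e4 : (List.take (33 + i) t).length ≤ 33 + (i + 1) + rest.length := by omega
    rw [e1, e2, List.take_take, e3, List.drop_eq_nil_of_le e4, List.drop_succ_cons,
        List.drop_drop]
    have e5 : 33 + i + 1 + rest.length = 33 + i + (name :: rest).length := by
      simp [List.length_cons]; omega
    rw [e5]
    simp [List.append_assoc]

-- A's result, in concatenation form
lemma a_eval (unit_types building_types : List String) :
    build_string_table unit_types building_types
      = all_buildings.drop 17
        ++ (unit_types.take 78 ++ List.replicate (78 - (unit_types.take 78).length) "")
        ++ all_buildings.take 17 := by
  show unitLoop (buildingLoop (List.replicate 128 "") 0 all_buildings) 0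
        (PySem.List.slice unit_types none (some 78)) = _
  rw [buildingLoop_eval]
  have hslice : PySem.List.slice unit_types none (some 78) = unit_types.take 78 := by
    exact_mod_cast PySem.List.slice_to_natCast unit_types 78
  rw [hslice]
  set us := unit_types.take 78 with hus
  have hk : us.length ≤ 78 := by rw [hus]; simp
  rw [unitLoop_eq us 0 _ (by rfl) (by omega)]
  rw [List.append_assoc (all_buildings.drop 17)]
  have hd : (all_buildings.drop 17).length = 33 := by rfl
  rw [List.take_append, List.drop_append, hd]
  have e1 : List.take (33 + 0) (all_buildings.drop 17) = all_buildings.drop 17 := by rfl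
  have e2 : (33 : Nat) + 0 - 33 = 0 := by omega
  have e3 : (all_buildings.drop 17).length ≤ 33 + 0 + us.length := by rw [hd]; omega
  have e4 : 33 + 0 + us.length - 33 = us.length := by omega
  rw [e1, e2, List.drop_eq_nil_of_le e3, e4, List.drop_append]
  have e5 : List.drop us.length (List.replicate 78 "") = List.replicate (78 - us.length) "" := by
    rw [List.drop_replicate]
  have e6 : us.length - (List.replicate 78 ("" : String)).length = 0 := by
    simp; omega
  rw [e5, e6]
  simp [List.append_assoc]

-- indexing with a default over range n IS take-then-pad
lemma map_range_getD (xs : List String) :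
    (List.range 78).map (fun k => xs.getD k "")
      = xs.take 78 ++ List.replicate (78 - (xs.take 78).length) "" := by
  apply List.ext_getElem
  · simp
  · intro i hi1 hi2
    simp only [List.length_map, List.length_range] at hi1
    rw [List.getElem_map, List.getElem_range]
    by_cases h : i < (xs.take 78).length
    · rw [List.getElem_append_left h]
      have hlen : i < xs.length := by simp [List.length_take] at h; omega
      simp [List.getD_eq_getElem?_getD, List.getElem?_eq_getElem hlen]
    · rw [List.getElem_append_right (by omega)]
      have hlen : xs.length ≤ i := by simp [List.length_take] at h ⊢; omega
      rw [List.getElem_replicate, List.getD_eq_getElem?_getD, List.getElem?_eq_none hlen]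
      rfl

-- B's result, in the same concatenation form
lemma b_eval (unit_types building_types : List String) :
    build_string_table_alt unit_types building_types
      = all_buildings.drop 17
        ++ (unit_types.take 78 ++ List.replicate (78 - (unit_types.take 78).length) "")
        ++ all_buildings.take 17 := by
  show (PySem.List.pyRange 0 128 1).map (bEntry unit_types bBuildings) = _
  rw [PySem.List.pyRange_one_append 0 33 128 (by omega) (by omega),
      PySem.List.pyRange_one_append 33 111 128 (by omega) (by omega),
      List.map_append, List.map_append]
  have seg1 : (PySem.List.pyRange 0 33 1).map (bEntry unit_types bBuildings)
      = all_buildings.drop 17 := by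
    rw [List.map_congr_left (g := fun i => (PySem.List.pyGet? bBuildings (i + 17)).getD "")]
    · decide
    · intro i hi
      rw [PySem.List.mem_pyRange_one] at hi
      simp only [bEntry, if_pos hi.2]
  have seg3 : (PySem.List.pyRange 111 128 1).map (bEntry unit_types bBuildings)
      = all_buildings.take 17 := by
    rw [List.map_congr_left (g := fun i => (PySem.List.pyGet? bBuildings (i - 111)).getD "")]
    · decide
    · intro i hi
      rw [PySem.List.mem_pyRange_one] at hi
      simp only [bEntry, if_neg (by omega : ¬ i < 33), if_neg (by omega : ¬ i < 111)]
  have seg2 : (PySem.List.pyRange 33 111 1).map (bEntry unit_types bBuildings)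
      = unit_types.take 78 ++ List.replicate (78 - (unit_types.take 78).length) "" := by
    rw [PySem.List.pyRange_one 33 111]
    have h78 : ((111 : Int) - 33).toNat = 78 := rfl
    rw [h78, List.map_map]
    rw [List.map_congr_left (g := fun k => unit_types.getD k "")]
    · exact map_range_getD unit_types
    · intro k hk
      rw [List.mem_range] at hk
      simp only [Function.comp_apply, bEntry,
        if_neg (by omega : ¬ (33 : Int) + (k : Int) < 33),
        if_pos (by omega : (33 : Int) + (k : Int) < 111)]
      have hj : (33 : Int) + (k : Int) - 33 = (k : Int) := by omega
      rw [hj, PySem.List.pyGet?_natCast]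
      by_cases hlt : (k : Int) < (unit_types.length : Int)
      · have hk' : k < unit_types.length := by exact_mod_cast hlt
        rw [if_pos hlt, List.getElem?_eq_getElem hk', List.getD_eq_getElem?_getD,
            List.getElem?_eq_getElem hk']
      · have hk' : unit_types.length ≤ k := by omega
        rw [if_neg hlt, List.getD_eq_getElem?_getD, List.getElem?_eq_none hk']
        rfl
  rw [seg1, seg2, seg3]
  simp [List.append_assoc]

-- ===== VERDICT =====
theorem build_string_table_spec : Claim_equal_build_string_table := by
  intro unit_types building_types _
  unfold Spec_build_string_table
  rw [a_eval, b_eval]
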